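-- pv_equiv track=rewrite | github.com/Guillaume-Delbarre/AdventOfCode | jour 12/main.py | compte
-- ===== SOURCE A (Python) =====
-- def compte(input) :
--     hash_en_cours = False
--     n = 0
--     ret = ''
--     for lettre in input :
--         if lettre == '#' :
--             hash_en_cours = True
--             n += 1
--         elif lettre == '.' :
--             if hash_en_cours :
--                 ret += str(n) + ','
--                 n = 0
--                 hash_en_cours = False
--     if hash_en_cours :
--         ret += str(n) + ','
--     return ret[:-1]
-- ===== SOURCE B (Python) =====
-- def compte(input):
--     return ','.join(str(g.count('#')) for g in input.split('.') if '#' in g)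
-- ===== Notes on version B (the rewrite author's own statement) =====
-- stated objective: simpler
-- what changed: Replaces the flag-and-accumulator per-character state machine with a split-count-filter-join pipeline over the dot-separated groups.
import Mathlib
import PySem

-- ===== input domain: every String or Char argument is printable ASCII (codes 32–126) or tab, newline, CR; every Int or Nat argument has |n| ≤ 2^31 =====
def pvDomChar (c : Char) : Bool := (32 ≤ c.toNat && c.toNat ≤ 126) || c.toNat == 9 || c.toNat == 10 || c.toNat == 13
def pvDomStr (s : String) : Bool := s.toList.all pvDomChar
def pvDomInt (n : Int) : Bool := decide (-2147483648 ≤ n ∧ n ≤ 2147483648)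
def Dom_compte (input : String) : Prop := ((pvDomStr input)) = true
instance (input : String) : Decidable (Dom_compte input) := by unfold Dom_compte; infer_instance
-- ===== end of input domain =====

-- B replaces A's flag-based single-pass state machine by a split-on-'.'/count-'#'/filter/join pipeline (simpler).


-- ===== PORT A =====
-- the for-loop over the characters, carrying A's state (hash_en_cours, n, ret)
def compteLoop : List Char → Bool → Int → List Char → Bool × Int × List Char
  | [], f, n, r => (f, n, r)
  | c :: cs, f, n, r =>
    if c = '#' then compteLoop cs true (n + 1) r
    else if c = '.' then
      if f then compteLoop cs false 0 (r ++ PySem.Int.toChars n ++ [','])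
      else compteLoop cs f n r
    else compteLoop cs f n r

def compte (input : String) : String :=
  -- final flush of the pending run, then ret[:-1]
  String.ofList (PySem.List.slice
    (if (compteLoop input.toList false 0 []).1
      then (compteLoop input.toList false 0 []).2.2
        ++ PySem.Int.toChars (compteLoop input.toList false 0 []).2.1 ++ [',']
      else (compteLoop input.toList false 0 []).2.2)
    none (some (-1)))

-- ===== PORT B =====
def compte_alt (input : String) : String :=
  String.ofList (PySem.Chars.join [',']
    (((PySem.Chars.splitOn input.toList ['.']).filter
        (fun g => PySem.Chars.isIn ['#'] g)).map
      (fun g => PySem.Int.toChars (PySem.Chars.count g ['#'] : Int))))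

-- ===== PRECONDITION & SPEC =====
def Spec_compte (input : String) (out : String) : Prop := out = compte_alt input
instance (input : String) (out : String) : Decidable (Spec_compte input out) := by unfold Spec_compte; infer_instance

-- ===== CLAIM (what is proved, stated in full; the proofs are below) =====
def Claim_equal_compte : Prop := ∀ (input : String), Dom_compte input → Spec_compte input (compte input)

-- ===== LEMMAS AND PROOFS =====

-- reference: Python's str.split('.') as a structural recursion
def sp : List Char → List (List Char)
  | [] => [[]]
  | c :: cs => if c = '.' then [] :: sp cs else (sp cs).modifyHead (c :: ·)

theorem sp_ne_nil (cs : List Char) : sp cs ≠ [] := by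
  cases cs with
  | nil => simp [sp]
  | cons c cs =>
    simp only [sp]
    split_ifs
    · simp
    · cases h : sp cs with
      | nil => exact absurd h (sp_ne_nil cs)
      | cons a t => simp [List.modifyHead]

theorem splitOn_go_eq (fuel : Nat) (l cur : List Char) (acc : List (List Char))
    (h : l.length < fuel) :
    PySem.Chars.splitOn.go ['.'] fuel l cur acc
      = acc.reverse ++ (sp l).modifyHead (cur.reverse ++ ·) := by
  induction fuel generalizing l cur acc with
  | zero => omega
  | succ f ih =>
    cases l with
    | nil => simp [PySem.Chars.splitOn.go, sp]
    | cons c rest =>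
      simp only [PySem.Chars.splitOn.go]
      by_cases hc : c = '.'
      · subst hc
        rw [if_pos (by simp [List.isPrefixOf])]
        rw [ih _ _ _ (by simpa using Nat.lt_of_succ_lt_succ h)]
        cases hsp : sp rest with
        | nil => exact absurd hsp (sp_ne_nil rest)
        | cons a t => simp [sp, hsp, List.modifyHead]
      · rw [if_neg (by simp [List.isPrefixOf]; exact fun h' => hc h'.symm)]
        rw [ih _ _ _ (by simpa using Nat.lt_of_succ_lt_succ h)]
        simp only [sp, if_neg hc]
        cases hsp : sp rest with
        | nil => exact absurd hsp (sp_ne_nil rest)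
        | cons a t => simp [List.modifyHead]


theorem splitOn_eq (l : List Char) : PySem.Chars.splitOn l ['.'] = sp l := by
  unfold PySem.Chars.splitOn
  rw [splitOn_go_eq _ _ _ _ (by omega)]
  cases h : sp l with
  | nil => exact absurd h (sp_ne_nil l)
  | cons a t => simp [List.modifyHead]

theorem count_go_eq (fuel : Nat) (l : List Char) (acc : Nat) (h : l.length ≤ fuel) :
    PySem.Chars.count.go ['#'] fuel l acc = acc + l.count '#' := by
  induction fuel generalizing l acc with
  | zero =>
    cases l with
    | nil => simp [PySem.Chars.count.go]
    | cons c cs => simp at h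
  | succ f ih =>
    cases l with
    | nil => simp [PySem.Chars.count.go]
    | cons c cs =>
      simp only [PySem.Chars.count.go]
      by_cases hc : c = '#'
      · subst hc
        rw [if_pos (by simp [List.isPrefixOf])]
        rw [ih _ _ (by simpa using h)]
        simp
        omega
      · rw [if_neg (by simp [List.isPrefixOf]; exact fun h' => hc h'.symm)]
        rw [ih _ _ (by simpa using h)]
        simp [hc]

theorem count_eq_count (g : List Char) : PySem.Chars.count g ['#'] = g.count '#' := by
  unfold PySem.Chars.count
  rw [if_neg (by simp)]
  simpa using count_go_eq g.length g 0 (le_refl _)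

theorem isIn_singleton (g : List Char) : PySem.Chars.isIn ['#'] g = g.contains '#' := by
  by_cases h : '#' ∈ g
  · have h1 : g.contains '#' = true := by simpa using h
    rw [h1, PySem.Chars.isIn_iff_infix]
    obtain ⟨pre, suf, rfl⟩ := List.append_of_mem h
    exact ⟨pre, suf, by simp⟩
  · have h1 : g.contains '#' = false := by simpa using h
    rw [h1, Bool.eq_false_iff]
    intro hc
    rw [PySem.Chars.isIn_iff_infix] at hc
    exact h (hc.mem (by simp))

-- the run lengths still to be emitted, given pending count n and flag f
def runs : List Char → Int → Bool → List Int
  | [], n, f => if f then [n] else []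
  | c :: cs, n, f =>
    if c = '#' then runs cs (n + 1) true
    else if c = '.' then (if f then n :: runs cs 0 false else runs cs n false)
    else runs cs n f

-- counts of the groups that contain a '#'
def cnts (gs : List (List Char)) : List Int :=
  (gs.filter (fun g => g.contains '#')).map (fun g => (g.count '#' : Int))

theorem compteLoop_flush (cs : List Char) :
    ∀ (f : Bool) (n : Int) (r : List Char),
    (if (compteLoop cs f n r).1
      then (compteLoop cs f n r).2.2 ++ PySem.Int.toChars (compteLoop cs f n r).2.1 ++ [',']
      else (compteLoop cs f n r).2.2)
      = r ++ (runs cs n f).flatMap (fun k => PySem.Int.toChars k ++ [',']) := by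
  induction cs with
  | nil => intro f n r; cases f <;> simp [compteLoop, runs]
  | cons c cs ih =>
    intro f n r
    simp only [compteLoop, runs]
    by_cases h1 : c = '#'
    · simp only [if_pos h1]; exact ih true (n + 1) r
    · simp only [if_neg h1]
      by_cases h2 : c = '.'
      · simp only [if_pos h2]
        cases f with
        | false => simpa using ih false n r
        | true =>
          simp only [if_true]
          rw [ih false 0 (r ++ PySem.Int.toChars n ++ [','])]
          simp
      · simp only [if_neg h2]; exact ih f n r

theorem cnts_cons_mem (a : List Char) (t : List (List Char)) :
    (if '#' ∈ a then [(a.count '#' : Int)] else []) ++ cnts t = cnts (a :: t) := by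
  by_cases ha : '#' ∈ a
  · have h1 : a.contains '#' = true := by simpa using ha
    simp [cnts, h1, ha]
  · have h1 : a.contains '#' = false := by simpa using ha
    simp [cnts, h1, ha]

theorem runs_eq_cnts (cs : List Char) :
    ∀ (n : Int) (f : Bool), (f = false → n = 0) →
    runs cs n f
      = (if f || (sp cs).head!.contains '#'
          then [n + ((sp cs).head!.count '#' : Int)] else [])
        ++ cnts (sp cs).tail := by
  induction cs with
  | nil =>
    intro n f hnf
    cases f with
    | false => simp [runs, sp, cnts, hnf rfl]
    | true => simp [runs, sp, cnts]
  | cons c cs ih =>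
    intro n f hnf
    simp only [runs, sp]
    by_cases h1 : c = '#'
    · subst h1
      have hne : ('#' : Char) ≠ '.' := by decide
      simp only [if_neg hne, if_pos rfl]
      rw [ih (n + 1) true (by simp)]
      cases hsp : sp cs with
      | nil => exact absurd hsp (sp_ne_nil cs)
      | cons a t =>
        simp [List.modifyHead, List.count_cons, hsp]
        ring
    · by_cases h2 : c = '.'
      · subst h2
        simp only [if_neg h1, if_pos rfl]
        cases f with
        | false =>
          rw [hnf rfl, ih 0 false (fun _ => rfl)]
          cases hsp : sp cs with
          | nil => exact absurd hsp (sp_ne_nil cs)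
          | cons a t =>
            simp only [List.head!, List.tail]
            simp
            exact cnts_cons_mem a t
        | true =>
          simp only [if_pos rfl]
          rw [ih 0 false (fun _ => rfl)]
          cases hsp : sp cs with
          | nil => exact absurd hsp (sp_ne_nil cs)
          | cons a t =>
            simp only [List.head!, List.tail]
            simp
            exact cnts_cons_mem a t
      · simp only [if_neg h1, if_neg h2]
        rw [ih n f hnf]
        cases hsp : sp cs with
        | nil => exact absurd hsp (sp_ne_nil cs)
        | cons a t =>
          have hcc : (c :: a).contains '#' = a.contains '#' := by
            simp only [List.contains_cons]
            have : ('#' == c) = false := by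
              simp only [beq_eq_false_iff_ne]; exact fun h => h1 h.symm
            simp [this]
          have h3 : ¬ ('#' = c) := fun h => h1 h.symm
          simp [List.modifyHead, List.count_cons, h1, h3, hcc]

theorem dropLast_flatMap_eq_intercalate (l : List Int) :
    (l.flatMap (fun k => PySem.Int.toChars k ++ [','])).dropLast
      = List.intercalate [','] (l.map PySem.Int.toChars) := by
  induction l with
  | nil => simp [List.intercalate]
  | cons a t ih =>
    cases t with
    | nil => simp [List.intercalate]
    | cons b t' =>
      have hne : ((b :: t').flatMap (fun k => PySem.Int.toChars k ++ [','])) ≠ [] := by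
        simp [List.flatMap]
      rw [List.flatMap_cons, List.dropLast_append_of_ne_nil hne, ih]
      simp [List.intercalate]

-- ===== VERDICT (by name: the statement is the Claim_ definition above) =====
theorem compte_spec : Claim_equal_compte := by
  intro input _
  unfold Spec_compte compte compte_alt
  rw [compteLoop_flush input.toList false 0 []]
  rw [PySem.List.slice_to_neg_one]
  rw [runs_eq_cnts input.toList 0 false (fun _ => rfl)]
  rw [splitOn_eq]
  congr 1
  rw [List.filter_congr (fun g _ => isIn_singleton g)]
  simp only [PySem.Chars.join, List.nil_append]
  rw [dropLast_flatMap_eq_intercalate]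
  congr 1
  cases hsp : sp input.toList with
  | nil => exact absurd hsp (sp_ne_nil input.toList)
  | cons a t =>
    simp only [List.head!, List.tail, Bool.false_or]
    by_cases ha : '#' ∈ a
    · have h1 : a.contains '#' = true := by simpa using ha
      simp [cnts, h1, ha, count_eq_count, List.map_map, Function.comp]
    · have h1 : a.contains '#' = false := by simpa using ha
      simp [cnts, h1, ha, count_eq_count, List.map_map, Function.comp]
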